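-- pv_equiv track=rewrite | github.com/Fondamenti18/fondamenti-di-programmazione | students/1800240/homework02/program03.py | confronta
-- ===== SOURCE A (Python) =====
-- def confronta(parola,codice):
--
--     diz = {}
--     verifica = ''
--
--     #Mette in relazione ongi lettera della parola
--     #con il rispettivo carattere del codice compilando
--     #un dizionario.
--     count = 0
--     while count < len(codice):
--         diz[codice[count]] = parola[count]
--         count +=1
--
--     chiavi = list(diz.keys())
--     valori= list(diz.values())
--
--     #Elimina le coppie che hanno lo stesso valore (se la parola è compatibile
--     #con il codice non ce ne sono) in modo che la parola venga ricostruita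
--     #sbagliata in caso di incompatibilità.
--     for chiave in chiavi:
--         if valori.count(diz[chiave]) > 1:
--             del(diz[chiave])
--
--     #Ricostruisce la parola dal dizionario e verifica
--     #se corrisponde alla parola di input.
--     for d in codice:
--         if d in diz.keys():
--             verifica += diz[d]
--
--     if verifica == parola:
--         return True
--     else:
--         return False
-- ===== SOURCE B (Python) =====
-- def confronta(parola, codice):
--     if len(parola) != len(codice):
--         return False
--     coppie = set(zip(codice, parola))
--     return len(coppie) == len(set(codice)) == len(set(parola))
-- ===== Notes on version B (the rewrite author's own statement) =====
-- stated objective: simpler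
-- what changed: Replaces A's build-dict / delete-values-appearing-twice / reconstruct-word-and-compare passes by a single distinct-count test: the word matches the code iff the lengths agree and the number of distinct (code,word) pairs equals the number of distinct code characters and of distinct word characters (consistency + injectivity of the substitution); Pre_ excludes the inputs where A raises IndexError (parola shorter than codice).
import Mathlib
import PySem

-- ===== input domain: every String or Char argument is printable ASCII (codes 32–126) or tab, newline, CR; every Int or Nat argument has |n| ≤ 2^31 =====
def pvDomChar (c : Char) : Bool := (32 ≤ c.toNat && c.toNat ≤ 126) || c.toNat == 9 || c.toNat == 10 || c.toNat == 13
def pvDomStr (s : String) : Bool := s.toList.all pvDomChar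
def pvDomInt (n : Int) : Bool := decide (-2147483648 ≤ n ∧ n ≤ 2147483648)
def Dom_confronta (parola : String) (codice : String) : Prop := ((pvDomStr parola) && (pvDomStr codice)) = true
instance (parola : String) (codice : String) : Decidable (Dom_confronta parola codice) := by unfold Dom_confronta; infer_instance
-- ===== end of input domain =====

-- B replaces A's build-dict / delete-duplicated-values / rebuild-the-word passes by a single
-- distinct-count test (equal numbers of distinct (code,word) pairs, distinct code chars and
-- distinct word chars); objective: simpler.  Where A raises IndexError (parola shorter than
-- codice, excluded by Pre_), B returns False.

-- ===== PORT A =====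
-- the 'while count < len(codice)' loop filling diz

def confrontaBuild (ps cs : List Char) (count : Nat) (diz : PySem.Dict Char Char) :
    PySem.Dict Char Char :=
  if h : count < cs.length then
    confrontaBuild ps cs (count + 1)
      (diz.insert (PySem.List.pyGetD cs (count : Int) ' ') (PySem.List.pyGetD ps (count : Int) ' '))
  else diz


def confronta (parola : String) (codice : String) : Bool :=
  let ps := parola.toList
  let cs := codice.toList
  let diz := confrontaBuild ps cs 0 PySem.Dict.empty
  let chiavi := diz.keys
  let valori := diz.values
  let diz2 := chiavi.foldl (fun d chiave =>
      if PySem.List.count valori (d.getD chiave ' ') > 1 then d.erase chiave else d) diz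
  let verifica := cs.foldl (fun acc d =>
      if diz2.keys.contains d then acc ++ [diz2.getD d ' '] else acc) ([] : List Char)
  if verifica = ps then true else false


-- ===== PORT B =====

def confronta_alt (parola : String) (codice : String) : Bool :=
  let ps := parola.toList
  let cs := codice.toList
  if ps.length ≠ cs.length then false
  else
    let coppie : PySem.Set (Char × Char) := PySem.Set.ofList (cs.zip ps)
    decide (coppie.length = (PySem.Set.ofList cs).length) &&
      decide ((PySem.Set.ofList cs).length = (PySem.Set.ofList ps).length)


-- ===== PRECONDITION & SPEC =====
-- Pre_ excludes exactly the inputs on which A raises IndexError (parola shorter than codice).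
def Pre_confronta (parola : String) (codice : String) : Prop :=
  codice.toList.length ≤ parola.toList.length
instance (parola : String) (codice : String) : Decidable (Pre_confronta parola codice) := by
  unfold Pre_confronta; infer_instance
def pvWitness_confronta : String × String := ("ab", "cd")

def Spec_confronta (parola : String) (codice : String) (out : Bool) : Prop :=
  out = confronta_alt parola codice
instance (parola : String) (codice : String) (out : Bool) : Decidable (Spec_confronta parola codice out) := by
  unfold Spec_confronta; infer_instance

-- ===== CLAIM (what is proved, stated in full; the proofs are below) =====
def Claim_equal_confronta : Prop := ∀ (parola : String) (codice : String),
  Dom_confronta parola codice → Pre_confronta parola codice →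
  Spec_confronta parola codice (confronta parola codice)

-- ===== LEMMAS AND PROOFS =====

-- a word is compatible with a code iff the lengths agree and the position pairs are a
-- consistent and injective substitution; both ports are proved equivalent to deciding pvP.

def pvIns (d : PySem.Dict Char Char) (p : Char × Char) : PySem.Dict Char Char := d.insert p.1 p.2

def pvLastVal? : List (Char × Char) → Char → Option Char
  | [], _ => none
  | p :: l, k => (pvLastVal? l k).or (if p.1 = k then some p.2 else none)

def pvGood (l : List (Char × Char)) : Prop :=
  ∀ p ∈ l, ∀ q ∈ l, (p.1 = q.1 → p = q) ∧ (p.2 = q.2 → p = q)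

def pvP (ps cs : List Char) : Prop := ps.length = cs.length ∧ pvGood (cs.zip ps)

theorem pvFind?_filter_ne (L : List (Char × Char)) (k k' : Char) (h : k' ≠ k) :
    List.find? (fun p => p.1 == k') (L.filter (fun p => !(p.1 == k))) =
      List.find? (fun p => p.1 == k') L := by
  induction L with
  | nil => rfl
  | cons p L ih =>
    rw [List.filter_cons]
    by_cases hp : (p.1 == k) = true
    · have hp' : p.1 = k := by simpa using hp
      have hne : (p.1 == k') = false := by simp [hp', Ne.symm h]
      rw [if_neg (by simp [hp]), ih]
      simp only [List.find?_cons]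
      simp [hne]
    · rw [if_pos (by simp_all)]
      simp only [List.find?_cons]
      cases hc : (p.1 == k') <;> simp [ih]

theorem pvFind?_filter_self (L : List (Char × Char)) (k : Char) :
    List.find? (fun p => p.1 == k) (L.filter (fun p => !(p.1 == k))) = none := by
  apply List.find?_eq_none.mpr
  intro p hp
  simp only [List.mem_filter] at hp
  simpa using hp.2

theorem pvGet?_erase_of_ne (d : PySem.Dict Char Char) (k k' : Char) (h : k' ≠ k) :
    (d.erase k).get? k' = d.get? k' := by
  obtain ⟨L⟩ := d
  simp only [PySem.Dict.erase, PySem.Dict.get?]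
  rw [pvFind?_filter_ne _ _ _ h]

theorem pvGet?_erase_self (d : PySem.Dict Char Char) (k : Char) :
    (d.erase k).get? k = none := by
  obtain ⟨L⟩ := d
  simp only [PySem.Dict.erase, PySem.Dict.get?]
  rw [pvFind?_filter_self]
  rfl

theorem pvGet?_foldl_ins (l : List (Char × Char)) (d : PySem.Dict Char Char) (k : Char) :
    (l.foldl pvIns d).get? k = (pvLastVal? l k).or (d.get? k) := by
  induction l generalizing d with
  | nil => rfl
  | cons p l ih =>
    simp only [List.foldl_cons, ih, pvLastVal?, Option.or_assoc]
    congr 1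
    unfold pvIns
    rw [PySem.Dict.get?_insert]
    by_cases hp : p.1 = k
    · simp [hp]
    · simp [hp, Ne.symm hp]

theorem pvLastVal?_isSome (l : List (Char × Char)) (k : Char) :
    (pvLastVal? l k).isSome = true ↔ k ∈ l.map Prod.fst := by
  induction l with
  | nil => simp [pvLastVal?]
  | cons p l ih =>
    rw [pvLastVal?, Option.isSome_or]
    by_cases hp : p.1 = k <;>
      simp [hp, ih, List.mem_map, eq_comm (a := k)]

theorem pvLastVal?_mem {l : List (Char × Char)} {k v : Char}
    (h : pvLastVal? l k = some v) : (k, v) ∈ l := by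
  induction l with
  | nil => simp [pvLastVal?] at h
  | cons p l ih =>
    obtain ⟨a, b⟩ := p
    rw [pvLastVal?] at h
    rcases ho : pvLastVal? l k with _ | w
    · rw [ho, Option.none_or] at h
      split at h
      · rename_i hp
        cases h
        simp only at hp
        subst hp
        exact List.mem_cons_self
      · cases h
    · rw [ho, Option.some_or] at h
      cases h; exact List.mem_cons_of_mem _ (ih ho)

theorem pvBuild_eq (ps cs : List Char) (hle : cs.length ≤ ps.length) :
    ∀ (count : Nat) (diz : PySem.Dict Char Char),
      confrontaBuild ps cs count diz = ((cs.drop count).zip (ps.drop count)).foldl pvIns diz := by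
  have main : ∀ (n count : Nat) (diz : PySem.Dict Char Char), cs.length - count = n →
      confrontaBuild ps cs count diz = ((cs.drop count).zip (ps.drop count)).foldl pvIns diz := by
    intro n
    induction n with
    | zero =>
      intro count diz hn
      have hge : cs.length ≤ count := by omega
      rw [confrontaBuild, dif_neg (by omega), List.drop_eq_nil_of_le hge]
      rfl
    | succ n ih =>
      intro count diz hn
      have hlt : count < cs.length := by omega
      have hlt' : count < ps.length := by omega
      rw [confrontaBuild, dif_pos hlt, ih (count + 1) _ (by omega),
        List.drop_eq_getElem_cons hlt, List.drop_eq_getElem_cons hlt']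
      simp only [List.zip_cons_cons, List.foldl_cons, pvIns]
      rw [PySem.List.pyGetD_natCast, PySem.List.pyGetD_natCast,
        List.getD_eq_getElem _ _ hlt, List.getD_eq_getElem _ _ hlt']
  intro count diz; exact main _ count diz rfl

theorem pvKeysD (l : List (Char × Char)) :
    (l.foldl pvIns PySem.Dict.empty).keys = PySem.Set.ofList (l.map Prod.fst) := by
  have := PySem.Dict.keys_foldl_insert_key (l := l) (key := Prod.fst)
    (f := fun _ x => x.2) (d := (PySem.Dict.empty : PySem.Dict Char Char))
  simpa [pvIns, PySem.Dict.keys_empty, PySem.Set.update_nil_left] using this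

theorem pvEraseLoop (valori : List Char) (D : PySem.Dict Char Char) :
    ∀ (rest : List Char) (d : PySem.Dict Char Char), rest.Nodup →
      (∀ k ∈ rest, d.get? k = D.get? k) → ∀ k,
      (rest.foldl (fun d chiave =>
          if PySem.List.count valori (d.getD chiave ' ') > 1 then d.erase chiave else d) d).get? k
        = if k ∈ rest ∧ 1 < PySem.List.count valori (D.getD k ' ') then none else d.get? k := by
  intro rest
  induction rest with
  | nil => intro d _ _ k; simp
  | cons c rest ih =>
    intro d hnd hagree k
    have hc : d.getD c ' ' = D.getD c ' ' := by
      rw [PySem.Dict.getD_eq_get?_getD, PySem.Dict.getD_eq_get?_getD, hagree c List.mem_cons_self]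
    rw [List.foldl_cons]
    by_cases hbad : 1 < PySem.List.count valori (D.getD c ' ')
    · rw [if_pos (by rw [hc]; exact hbad)]
      have hagree' : ∀ k ∈ rest, (d.erase c).get? k = D.get? k := by
        intro k hk
        have hne : k ≠ c := fun e => (List.nodup_cons.mp hnd).1 (e ▸ hk)
        rw [pvGet?_erase_of_ne _ _ _ hne, hagree k (List.mem_cons_of_mem _ hk)]
      rw [ih _ (List.nodup_cons.mp hnd).2 hagree' k]
      by_cases hk : k ∈ rest ∧ 1 < PySem.List.count valori (D.getD k ' ')
      · rw [if_pos hk, if_pos ⟨List.mem_cons_of_mem _ hk.1, hk.2⟩]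
      · rw [if_neg hk]
        by_cases hkc : k = c
        · subst hkc
          rw [pvGet?_erase_self, if_pos ⟨List.mem_cons_self, hbad⟩]
        · rw [pvGet?_erase_of_ne _ _ _ hkc, if_neg (by
            rintro ⟨hm, hb⟩
            rcases List.mem_cons.mp hm with h1 | h1
            · exact hkc h1
            · exact hk ⟨h1, hb⟩)]
    · rw [if_neg (by rw [hc]; exact hbad)]
      rw [ih _ (List.nodup_cons.mp hnd).2 (fun k hk => hagree k (List.mem_cons_of_mem _ hk)) k]
      by_cases hk : k ∈ rest ∧ 1 < PySem.List.count valori (D.getD k ' ')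
      · rw [if_pos hk, if_pos ⟨List.mem_cons_of_mem _ hk.1, hk.2⟩]
      · rw [if_neg hk, if_neg (by
          rintro ⟨hm, hb⟩
          rcases List.mem_cons.mp hm with h1 | h1
          · subst h1; exact hbad hb
          · exact hk ⟨h1, hb⟩)]

theorem pvCard_ofList {α : Type} [BEq α] [LawfulBEq α] [DecidableEq α] (xs : List α) :
    (PySem.Set.ofList xs).length = xs.toFinset.card := by
  rw [← List.toFinset_card_of_nodup (PySem.Set.nodup_ofList (xs := xs))]
  congr 1
  ext a
  simp [PySem.Set.mem_ofList]

theorem pvInjOn_iff (l : List (Char × Char)) (f : Char × Char → Char) :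
    ((PySem.Set.ofList (l.map f)).length = (PySem.Set.ofList l).length) ↔
      ∀ p ∈ l, ∀ q ∈ l, f p = f q → p = q := by
  rw [pvCard_ofList (l.map f), pvCard_ofList l,
    show (l.map f).toFinset = l.toFinset.image f by ext a; simp, Finset.card_image_iff]
  constructor
  · intro h p hp q hq hf
    exact h (by simpa using hp) (by simpa using hq) hf
  · intro h a ha b hb hf
    exact h a (by simpa using ha) b (by simpa using hb) hf

theorem pvB_true_iff (parola codice : String) :
    (confronta_alt parola codice = true) ↔ pvP parola.toList codice.toList := by
  unfold confronta_alt pvP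
  set ps := parola.toList
  set cs := codice.toList
  by_cases hlen : ps.length = cs.length
  · rw [if_neg (by omega)]
    have hfst : (cs.zip ps).map Prod.fst = cs := List.map_fst_zip (by omega)
    have hsnd : (cs.zip ps).map Prod.snd = ps := List.map_snd_zip (by omega)
    simp only [Bool.and_eq_true, decide_eq_true_eq]
    constructor
    · rintro ⟨h1, h2⟩
      refine ⟨hlen, ?_⟩
      have hinj1 := (pvInjOn_iff (cs.zip ps) Prod.fst).mp (by rw [hfst]; omega)
      have hinj2 := (pvInjOn_iff (cs.zip ps) Prod.snd).mp (by rw [hsnd]; omega)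
      exact fun p hp q hq => ⟨fun e => hinj1 p hp q hq e, fun e => hinj2 p hp q hq e⟩
    · rintro ⟨_, hg⟩
      have h1 : (PySem.Set.ofList ((cs.zip ps).map Prod.fst)).length =
          (PySem.Set.ofList (cs.zip ps)).length :=
        (pvInjOn_iff (cs.zip ps) Prod.fst).mpr (fun p hp q hq e => (hg p hp q hq).1 e)
      have h2 : (PySem.Set.ofList ((cs.zip ps).map Prod.snd)).length =
          (PySem.Set.ofList (cs.zip ps)).length :=
        (pvInjOn_iff (cs.zip ps) Prod.snd).mpr (fun p hp q hq e => (hg p hp q hq).2 e)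
      rw [hfst] at h1
      rw [hsnd] at h2
      omega
  · rw [if_pos (by omega)]
    simp only [Bool.false_eq_true, false_iff]
    rintro ⟨h, _⟩; exact hlen h

theorem pvCountP_le_one {ks : List Char} {p : Char → Bool} {c : Char}
    (hnd : ks.Nodup) (h : ∀ k ∈ ks, p k = true → k = c) : ks.countP p ≤ 1 := by
  induction ks with
  | nil => simp
  | cons a ks ih =>
    rw [List.countP_cons]
    rcases List.nodup_cons.mp hnd with ⟨ha, hnd'⟩
    by_cases hp : p a = true
    · have hac := h a List.mem_cons_self hp
      have : ks.countP p = 0 := by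
        rw [List.countP_eq_zero]
        intro k hk hpk
        exact ha ((h k (List.mem_cons_of_mem _ hk) hpk).trans hac.symm ▸ hk)
      simp [hp, this]
    · have := ih hnd' (fun k hk hpk => h k (List.mem_cons_of_mem _ hk) hpk)
      simp [hp]; omega

theorem pvTwo_le_countP {ks : List Char} {p : Char → Bool} {a b : Char}
    (ha : a ∈ ks) (hb : b ∈ ks) (hab : a ≠ b) (hpa : p a = true) (hpb : p b = true) :
    2 ≤ ks.countP p := by
  obtain ⟨s, t, rfl⟩ := List.append_of_mem ha
  rw [List.countP_append, List.countP_cons]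
  have hb' : b ∈ s ∨ b ∈ t := by
    rcases List.mem_append.mp hb with h | h
    · exact Or.inl h
    · rcases List.mem_cons.mp h with h | h
      · exact absurd h.symm hab
      · exact Or.inr h
    
  rcases hb' with h | h
  · have : 0 < s.countP p := List.countP_pos_iff.mpr ⟨b, h, hpb⟩
    simp [hpa]; omega
  · have : 0 < t.countP p := List.countP_pos_iff.mpr ⟨b, h, hpb⟩
    simp [hpa]; omega

theorem pvA_true_iff (parola codice : String) (h : codice.toList.length ≤ parola.toList.length) :
    (confronta parola codice = true) ↔ pvP parola.toList codice.toList := by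
  simp only [confronta]
  set ps := parola.toList with hps
  set cs := codice.toList with hcs
  rw [pvBuild_eq ps cs h 0 PySem.Dict.empty, List.drop_zero, List.drop_zero]
  set l := cs.zip ps with hl
  set D := l.foldl pvIns PySem.Dict.empty with hD
  set diz2 := List.foldl (fun d chiave =>
      if PySem.List.count D.values (d.getD chiave ' ') > 1 then d.erase chiave else d) D D.keys with hX
  have hfst : l.map Prod.fst = cs := List.map_fst_zip h
  have hkeys : D.keys = PySem.Set.ofList cs := by rw [hD, pvKeysD, hfst]
  have hnd : D.keys.Nodup := by rw [hkeys]; exact PySem.Set.nodup_ofList cs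
  have hDget : ∀ c, D.get? c = pvLastVal? l c := by
    intro c; rw [hD, pvGet?_foldl_ins, PySem.Dict.get?_empty, Option.or_none]
  have hdiz2 : ∀ k, diz2.get? k =
      if k ∈ D.keys ∧ 1 < PySem.List.count D.values (D.getD k ' ') then none else D.get? k := by
    intro k
    rw [hX]
    exact pvEraseLoop D.values D D.keys D hnd (fun _ _ => rfl) k
  have hvalues : D.values = D.keys.map (fun k => D.getD k ' ') :=
    PySem.Dict.values_eq_map_keys D hnd ' '
  have hcount : ∀ v, PySem.List.count D.values v =
      (PySem.Set.ofList cs).countP (fun k => D.getD k ' ' == v) := by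
    intro v
    rw [PySem.List.count_eq]
    rw [hvalues]
    rw [hkeys]
    rw [List.count_eq_countP]
    rw [List.countP_map]
    rfl
  have hmemD : ∀ c ∈ cs, c ∈ D.keys := by
    intro c hc; rw [hkeys]; exact (PySem.Set.mem_ofList cs c).mpr hc
  have hsome : ∀ c ∈ cs, (pvLastVal? l c).isSome = true := by
    intro c hc; rw [pvLastVal?_isSome, hfst]; exact hc
  have hkeymem : ∀ c ∈ cs, (diz2.keys.contains c = true ↔
      ¬ 1 < PySem.List.count D.values (D.getD c ' ')) := by
    intro c hc
    rw [List.contains_iff_mem]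
    by_cases hb : 1 < PySem.List.count D.values (D.getD c ' ')
    · simp only [hb, not_true, iff_false]
      intro hmem
      exact (PySem.Dict.get?_eq_none_iff_not_mem_keys diz2 c).mp
        (by rw [hdiz2 c, if_pos ⟨hmemD c hc, hb⟩]) hmem
    · simp only [hb, not_false_iff, iff_true]
      by_contra hmem
      have h0 := (PySem.Dict.get?_eq_none_iff_not_mem_keys diz2 c).mpr hmem
      rw [hdiz2 c, if_neg (fun hh => hb hh.2), hDget c] at h0
      have := hsome c hc
      rw [h0] at this
      simp at this
  have hgetD2 : ∀ c ∈ cs, ¬ (1 < PySem.List.count D.values (D.getD c ' ')) →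
      diz2.getD c ' ' = D.getD c ' ' := by
    intro c hc hb
    rw [PySem.Dict.getD_eq_get?_getD, PySem.Dict.getD_eq_get?_getD, hdiz2 c,
      if_neg (fun hh => hb hh.2)]
  rw [PySem.List.foldl_append_if (fun d => diz2.keys.contains d) (fun d => diz2.getD d ' ') cs [],
    List.nil_append]
  have hfilter : cs.filter (fun d => diz2.keys.contains d)
      = cs.filter (fun c => !decide (1 < PySem.List.count D.values (D.getD c ' '))) := by
    apply List.filter_congr
    intro x hx
    have hiff := hkeymem x hx
    show diz2.keys.contains x = !decide (1 < PySem.List.count D.values (D.getD x ' '))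
    by_cases hb : 1 < PySem.List.count D.values (D.getD x ' ')
    · have hfalse : diz2.keys.contains x = false := by
        cases hcx : diz2.keys.contains x
        · rfl
        · exact absurd hb (hiff.mp hcx)
      rw [hfalse]
      simp only [hb, decide_true, Bool.not_true]
    · rw [hiff.mpr hb]
      simp only [hb, decide_false, Bool.not_false]
  rw [hfilter]
  have hver : (cs.filter (fun c => !decide (1 < PySem.List.count D.values (D.getD c ' ')))).map
        (fun d => diz2.getD d ' ')
      = (cs.filter (fun c => !decide (1 < PySem.List.count D.values (D.getD c ' ')))).map
        (fun c => D.getD c ' ') := by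
    apply List.map_congr_left
    intro c hcf
    have hm := List.mem_filter.mp hcf
    exact hgetD2 c hm.1 (by simpa using hm.2)
  rw [hver]
  have hlenzip : l.length = cs.length := by rw [hl, List.length_zip]; omega
  have forward : (cs.filter (fun c => !decide (1 < PySem.List.count D.values (D.getD c ' ')))).map
      (fun c => D.getD c ' ') = ps → pvP ps cs := by
    intro hv
    set q : Char → Bool := fun c => !decide (1 < PySem.List.count D.values (D.getD c ' ')) with hq
    have hlf : (cs.filter q).length = ps.length := by
      rw [← List.length_map (f := fun c => D.getD c ' '), hv]
    have hsub : (cs.filter q).Sublist cs := List.filter_sublist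
    have hfe : cs.filter q = cs := hsub.eq_of_length (by have := hsub.length_le; omega)
    have hcseq : cs.length = ps.length := by rw [← hfe, hlf]
    rw [hfe] at hv
    have hallkeep : ∀ c ∈ cs, q c = true := List.filter_eq_self.mp hfe
    have hpair : ∀ p ∈ l, D.getD p.1 ' ' = p.2 := by
      intro p hp
      obtain ⟨i, hi, hip⟩ := List.mem_iff_getElem.mp hp
      have hic : i < cs.length := by omega
      have hips : i < ps.length := by omega
      have hzip : l[i] = (cs[i], ps[i]) := List.getElem_zip
      have hvi : D.getD cs[i] ' ' = ps[i] := by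
        have h1 : (cs.map (fun c => D.getD c ' '))[i]? = ps[i]? := by rw [hv]
        rw [List.getElem?_map, List.getElem?_eq_getElem hic, List.getElem?_eq_getElem hips] at h1
        simpa using h1
      rw [← hip, hzip]
      exact hvi
    refine ⟨hcseq.symm, ?_⟩
    intro p hp q' hq'
    constructor
    · intro e
      exact Prod.ext_iff.mpr ⟨e, by rw [← hpair p hp, ← hpair q' hq', e]⟩
    · intro e
      by_contra hne
      have hne1 : p.1 ≠ q'.1 := fun e1 => hne (Prod.ext_iff.mpr ⟨e1, e⟩)
      have hp1 : p.1 ∈ cs := by rw [← hfst]; exact List.mem_map_of_mem hp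
      have hq1 : q'.1 ∈ cs := by rw [← hfst]; exact List.mem_map_of_mem hq'
      have hcle : PySem.List.count D.values (D.getD p.1 ' ') ≤ 1 := by
        have := hallkeep p.1 hp1
        rw [hq] at this
        simpa using this
      have h2 : 2 ≤ (PySem.Set.ofList cs).countP (fun k => D.getD k ' ' == D.getD p.1 ' ') := by
        apply pvTwo_le_countP ((PySem.Set.mem_ofList cs p.1).mpr hp1)
          ((PySem.Set.mem_ofList cs q'.1).mpr hq1) hne1 (by simp)
        have : D.getD q'.1 ' ' = D.getD p.1 ' ' := by
          rw [hpair q' hq', hpair p hp, e]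
        simp [this]
      rw [hcount] at hcle
      omega
  have backward : pvP ps cs →
      (cs.filter (fun c => !decide (1 < PySem.List.count D.values (D.getD c ' ')))).map
        (fun c => D.getD c ' ') = ps := by
    rintro ⟨hlen, hgood⟩
    have hpair : ∀ p ∈ l, D.getD p.1 ' ' = p.2 := by
      intro p hp'
      have hs := hsome p.1 (by rw [← hfst]; exact List.mem_map_of_mem hp')
      obtain ⟨v, hvv⟩ := Option.isSome_iff_exists.mp hs
      have hmem := pvLastVal?_mem hvv
      have heq : (p.1, v) = p := (hgood (p.1, v) hmem p hp').1 rfl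
      rw [PySem.Dict.getD_eq_get?_getD, hDget, hvv]
      simpa using congrArg Prod.snd heq
    have hallc : ∀ c ∈ cs, ∃ p ∈ l, p.1 = c := by
      intro c hc
      rw [← hfst] at hc
      obtain ⟨p, hpl, he⟩ := List.mem_map.mp hc
      exact ⟨p, hpl, he⟩
    have hkeep : ∀ c ∈ cs, ¬ (1 < PySem.List.count D.values (D.getD c ' ')) := by
      intro c hc
      rw [hcount]
      have hle := pvCountP_le_one (ks := PySem.Set.ofList cs)
        (p := fun k => D.getD k ' ' == D.getD c ' ') (c := c) (PySem.Set.nodup_ofList _) ?harg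
      · omega
      case harg =>
        intro k hk hkv
        obtain ⟨pk, hpkl, hpk1⟩ := hallc k ((PySem.Set.mem_ofList cs k).mp hk)
        obtain ⟨pc, hpcl, hpc1⟩ := hallc c hc
        have hk2 : pk.2 = pc.2 := by
          have h1 := hpair pk hpkl
          have h2 := hpair pc hpcl
          rw [hpk1] at h1
          rw [hpc1] at h2
          rw [← h1, ← h2]
          exact eq_of_beq hkv
        have := (hgood pk hpkl pc hpcl).2 hk2
        rw [← hpk1, ← hpc1, this]
    have hfe : cs.filter (fun c => !decide (1 < PySem.List.count D.values (D.getD c ' '))) = cs :=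
      List.filter_eq_self.mpr (fun c hc => by simpa using hkeep c hc)
    rw [hfe]
    apply List.ext_getElem (by rw [List.length_map]; omega)
    intro i hi1 hi2
    rw [List.getElem_map]
    have hmem : (cs[i], ps[i]) ∈ l := by
      have hil : i < l.length := by omega
      have := List.getElem_mem hil
      rw [List.getElem_zip] at this
      exact this
    exact hpair _ hmem
  split_ifs with hv
  · exact iff_of_true rfl (forward hv)
  · exact iff_of_false (by simp) (fun hp => hv (backward hp))

-- ===== VERDICT (by name: the statement is the Claim_ definition above) =====
theorem confronta_spec : Claim_equal_confronta := by
  intro parola codice _ hpre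
  unfold Spec_confronta
  rw [Bool.eq_iff_iff]
  exact (pvA_true_iff _ _ hpre).trans (pvB_true_iff _ _).symm
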